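-- pv_equiv track=rewrite | github.com/nishankbhola/insuranceQuality | backend/validator/compare_engine.py | _conviction_keywords_match
-- ===== SOURCE A (Python) =====
-- def _conviction_keywords_match(desc1, desc2):
--     """
--     Check if conviction descriptions match based on key keywords
--     """
--     if not desc1 or not desc2:
--         return False
--
--     # Define keyword groups for common conviction types
--     keyword_groups = {
--         'handheld_device': [
--             'hand-held', 'handheld', 'hand held', 'device', 'com', 'communication',
--             'prohibited', 'shall not', 'using', 'holding', 'drive', 'driving'
--         ],
--         'speeding': [
--             'speed', 'speeding', 'exceed', 'limit', 'km/h', 'mph'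
--         ],
--         'red_light': [
--             'red light', 'traffic light', 'signal', 'stop'
--         ],
--         'seatbelt': [
--             'seatbelt', 'seat belt', 'restraint', 'safety'
--         ],
--         'dui': [
--             'dui', 'dwi', 'impaired', 'alcohol', 'drug', 'intoxicated'
--         ]
--     }
--
--     # Check if both descriptions contain keywords from the same group
--     desc1_lower = desc1.lower()
--     desc2_lower = desc2.lower()
--
--     for group_name, keywords in keyword_groups.items():
--         desc1_has_keywords = any(keyword in desc1_lower for keyword in keywords)
--         desc2_has_keywords = any(keyword in desc2_lower for keyword in keywords)
--
--         if desc1_has_keywords and desc2_has_keywords: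
--             return True
--
--     return False
-- ===== SOURCE B (Python) =====
-- KEYWORD_GROUPS = {
--     'handheld_device': [
--         'hand-held', 'handheld', 'hand held', 'device', 'com', 'communication',
--         'prohibited', 'shall not', 'using', 'holding', 'drive', 'driving'
--     ],
--     'speeding': [
--         'speed', 'speeding', 'exceed', 'limit', 'km/h', 'mph'
--     ],
--     'red_light': [
--         'red light', 'traffic light', 'signal', 'stop'
--     ],
--     'seatbelt': [
--         'seatbelt', 'seat belt', 'restraint', 'safety'
--     ],
--     'dui': [
--         'dui', 'dwi', 'impaired', 'alcohol', 'drug', 'intoxicated'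
--     ]
-- }
--
-- # Flat keyword index built once: each keyword is tagged with the bit of its group.
-- _KW_BITS = [(kw, 1 << i)
--             for i, kws in enumerate(KEYWORD_GROUPS.values())
--             for kw in kws]
--
--
-- def _conviction_keywords_match(desc1, desc2):
--     if not desc1 or not desc2:
--         return False
--     d1 = desc1.lower()
--     d2 = desc2.lower()
--     m1 = 0
--     m2 = 0
--     for kw, bit in _KW_BITS:
--         if kw in d1:
--             m1 |= bit
--         if kw in d2:
--             m2 |= bit
--     return (m1 & m2) != 0
-- ===== Notes on version B (the rewrite author's own statement) =====
-- stated objective: alternative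
-- what changed: B replaces A's per-group loop with its nested any() scans and early return by a flat keyword->group-bit index built once; a single pass over that flat keyword list accumulates one bitmask per description, and the result is whether the two bitmasks share a bit (m1 & m2 != 0).
import Mathlib
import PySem

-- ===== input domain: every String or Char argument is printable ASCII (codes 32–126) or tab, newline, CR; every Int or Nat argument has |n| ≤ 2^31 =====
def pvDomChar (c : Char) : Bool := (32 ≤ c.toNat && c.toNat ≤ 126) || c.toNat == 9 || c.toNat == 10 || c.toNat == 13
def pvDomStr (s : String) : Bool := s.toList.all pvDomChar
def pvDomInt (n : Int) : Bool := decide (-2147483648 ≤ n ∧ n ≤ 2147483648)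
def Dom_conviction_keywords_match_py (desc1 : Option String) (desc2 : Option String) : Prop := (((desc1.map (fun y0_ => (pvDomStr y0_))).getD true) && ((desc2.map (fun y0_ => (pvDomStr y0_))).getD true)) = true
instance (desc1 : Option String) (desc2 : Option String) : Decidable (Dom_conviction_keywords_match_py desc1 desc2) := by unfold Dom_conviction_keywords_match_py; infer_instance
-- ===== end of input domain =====

-- B replaces A's per-group loop (two any() scans per group, early return) by a flat
-- keyword->group-bit index built once and a single pass accumulating one bitmask per
-- description; the result is whether the two bitmasks share a bit. No behaviour change.

-- ===== PORT A =====

-- A's keyword_groups table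
def pvGroupsA : List (String × List String) :=
  [ ("handheld_device",
      ["hand-held", "handheld", "hand held", "device", "com", "communication",
       "prohibited", "shall not", "using", "holding", "drive", "driving"]),
    ("speeding", ["speed", "speeding", "exceed", "limit", "km/h", "mph"]),
    ("red_light", ["red light", "traffic light", "signal", "stop"]),
    ("seatbelt", ["seatbelt", "seat belt", "restraint", "safety"]),
    ("dui", ["dui", "dwi", "impaired", "alcohol", "drug", "intoxicated"]) ]

-- any(keyword in d for keyword in keywords)
def pvAnyIn (kws : List String) (d : String) : Bool :=
  kws.any (fun k => PySem.Str.isIn k d)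

-- the for-loop over keyword_groups.items() with early return True
def pvLoopA (d1 d2 : String) : List (String × List String) → Bool
  | [] => false
  | (_, kws) :: rest =>
      let desc1_has := pvAnyIn kws d1
      let desc2_has := pvAnyIn kws d2
      if desc1_has && desc2_has then true else pvLoopA d1 d2 rest

def conviction_keywords_match_py (desc1 : Option String) (desc2 : Option String) : Bool :=
  match desc1, desc2 with
  | some s1, some s2 =>
      if s1 = "" || s2 = "" then false   -- 'if not desc1 or not desc2' (empty string is falsy)
      else pvLoopA (PySem.Str.lower s1) (PySem.Str.lower s2) pvGroupsA
  | _, _ => false                        -- None is falsy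

-- ===== PORT B =====

-- B only reads KEYWORD_GROUPS.values(); ported as the list of value lists in dict order
def pvGroupsBVals : List (List String) :=
  [ ["hand-held", "handheld", "hand held", "device", "com", "communication",
     "prohibited", "shall not", "using", "holding", "drive", "driving"],
    ["speed", "speeding", "exceed", "limit", "km/h", "mph"],
    ["red light", "traffic light", "signal", "stop"],
    ["seatbelt", "seat belt", "restraint", "safety"],
    ["dui", "dwi", "impaired", "alcohol", "drug", "intoxicated"] ]

-- the comprehension building _KW_BITS: [(kw, 1 << i) for i, kws in enumerate(values) for kw in kws]
-- (the masks are nonnegative Python ints; ported as Nat, exact here)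
def pvFlatten : List (List String) → Nat → List (String × Nat)
  | [], _ => []
  | kws :: rest, i => kws.map (fun k => (k, 2 ^ i)) ++ pvFlatten rest (i + 1)

def pvKwBits : List (String × Nat) := pvFlatten pvGroupsBVals 0

-- B's single for-loop over _KW_BITS accumulating the two bitmasks
def pvLoopB (d1 d2 : String) : List (String × Nat) → Nat → Nat → Nat × Nat
  | [], m1, m2 => (m1, m2)
  | (kw, bit) :: rest, m1, m2 =>
      pvLoopB d1 d2 rest
        (if PySem.Str.isIn kw d1 then m1 ||| bit else m1)
        (if PySem.Str.isIn kw d2 then m2 ||| bit else m2)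

def conviction_keywords_match_py_alt (desc1 : Option String) (desc2 : Option String) : Bool :=
  match desc1 with
  | none => false                        -- None is falsy
  | some s1 =>
    match desc2 with
    | none => false
    | some s2 =>
      if s1 = "" || s2 = "" then false
      else
        let d1 := PySem.Str.lower s1
        let d2 := PySem.Str.lower s2
        let p := pvLoopB d1 d2 pvKwBits 0 0
        p.1 &&& p.2 != 0                 -- (m1 & m2) != 0

-- ===== PRECONDITION & SPEC =====
def Spec_conviction_keywords_match_py (desc1 : Option String) (desc2 : Option String) (out : Bool) : Prop := out = conviction_keywords_match_py_alt desc1 desc2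
instance (desc1 : Option String) (desc2 : Option String) (out : Bool) : Decidable (Spec_conviction_keywords_match_py desc1 desc2 out) := by unfold Spec_conviction_keywords_match_py; infer_instance

-- ===== CLAIM (what is proved, stated in full; the proofs are below) =====
def Claim_equal_conviction_keywords_match_py : Prop := ∀ (desc1 : Option String) (desc2 : Option String), Dom_conviction_keywords_match_py desc1 desc2 → Spec_conviction_keywords_match_py desc1 desc2 (conviction_keywords_match_py desc1 desc2)

-- ===== LEMMAS AND PROOFS =====

-- A's loop returns true iff some group triggers in both descriptions
theorem pvLoopA_iff (d1 d2 : String) (gs : List (String × List String)) :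
    pvLoopA d1 d2 gs = true ↔
      ∃ (t : Nat) (g : String × List String),
        gs[t]? = some g ∧ pvAnyIn g.2 d1 = true ∧ pvAnyIn g.2 d2 = true := by
  induction gs with
  | nil => simp [pvLoopA]
  | cons p gs ih =>
    obtain ⟨n, kws⟩ := p
    simp only [pvLoopA]
    by_cases h : (pvAnyIn kws d1 && pvAnyIn kws d2) = true
    · simp only [h, if_true, true_iff]
      exact ⟨0, (n, kws), rfl, by simpa using h⟩
    · rw [if_neg h, ih]
      constructor
      · rintro ⟨t, g, hg, h1, h2⟩
        exact ⟨t + 1, g, by simpa using hg, h1, h2⟩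
      · rintro ⟨t, g, hg, h1, h2⟩
        cases t with
        | zero =>
            simp only [List.getElem?_cons_zero, Option.some_inj] at hg
            subst hg
            exact absurd (by simp [h1, h2]) h
        | succ t => exact ⟨t, g, by simpa using hg, h1, h2⟩

-- B's loop is two independent mask folds
def pvMask (d : String) (l : List (String × Nat)) (m : Nat) : Nat :=
  l.foldl (fun m p => if PySem.Str.isIn p.1 d then m ||| p.2 else m) m

theorem pvLoopB_eq (d1 d2 : String) (l : List (String × Nat)) (m1 m2 : Nat) :
    pvLoopB d1 d2 l m1 m2 = (pvMask d1 l m1, pvMask d2 l m2) := by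
  induction l generalizing m1 m2 with
  | nil => rfl
  | cons p rest ih =>
      obtain ⟨kw, bit⟩ := p
      simp only [pvLoopB, pvMask, List.foldl_cons]
      exact ih _ _

theorem pvMask_testBit (d : String) (l : List (String × Nat)) (m : Nat) (j : Nat) :
    (pvMask d l m).testBit j =
      (m.testBit j || l.any (fun p => PySem.Str.isIn p.1 d && p.2.testBit j)) := by
  induction l generalizing m with
  | nil => simp [pvMask]
  | cons p rest ih =>
    have hstep : pvMask d (p :: rest) m
        = pvMask d rest (if PySem.Str.isIn p.1 d then m ||| p.2 else m) := rfl
    rw [hstep, ih, List.any_cons]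
    by_cases h : PySem.Str.isIn p.1 d = true
    · rw [if_pos h, h, Nat.testBit_or]
      simp [Bool.or_assoc]
    · simp only [Bool.not_eq_true] at h
      rw [if_neg (by rw [show PySem.Str.isIn p.1 d = PySem.Chars.isIn p.1.toList d.toList from rfl] at h; simp [h]), h]
      simp

-- bit j of a flattened-index mask ⟷ a group at offset j triggers
theorem pvFlatten_any (d : String) (gs : List (List String)) (i j : Nat) :
    (pvFlatten gs i).any (fun p => PySem.Str.isIn p.1 d && p.2.testBit j) = true ↔
      ∃ (t : Nat) (kws : List String),
        gs[t]? = some kws ∧ j = i + t ∧ pvAnyIn kws d = true := by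
  induction gs generalizing i with
  | nil => simp [pvFlatten]
  | cons kws gs ih =>
    simp only [pvFlatten, List.any_append, List.any_map, Bool.or_eq_true, ih]
    constructor
    · rintro (h | ⟨t, g, hg, rfl, hga⟩)
      · simp only [List.any_eq_true, Function.comp] at h
        obtain ⟨k, hk, hkd⟩ := h
        rw [Nat.testBit_two_pow] at hkd
        obtain ⟨hin, hij⟩ : PySem.Str.isIn k d = true ∧ i = j := by
          constructor
          · exact (Bool.and_eq_true_iff.mp hkd).1
          · exact of_decide_eq_true (Bool.and_eq_true_iff.mp hkd).2
        refine ⟨0, kws, rfl, by omega, ?_⟩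
        exact List.any_eq_true.mpr ⟨k, hk, hin⟩
      · exact ⟨t + 1, g, by simpa using hg, by omega, hga⟩
    · rintro ⟨t, g, hg, rfl, hga⟩
      cases t with
      | zero =>
          simp only [List.getElem?_cons_zero, Option.some_inj] at hg
          subst hg
          left
          simp only [pvAnyIn, List.any_eq_true] at hga
          obtain ⟨k, hk, hkd⟩ := hga
          refine List.any_eq_true.mpr ⟨k, hk, ?_⟩
          show (PySem.Str.isIn k d && (2 ^ i).testBit (i + 0)) = true
          rw [Nat.testBit_two_pow, hkd]
          simp
      | succ t =>
          right
          exact ⟨t, g, by simpa using hg, by omega, hga⟩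

theorem pvNat_ne_zero_iff (n : Nat) : (n != 0) = true ↔ ∃ j, n.testBit j = true := by
  constructor
  · intro h
    by_contra hc
    push Not at hc
    have : n = 0 := Nat.eq_of_testBit_eq (fun j => by
      simpa [Nat.zero_testBit] using Bool.eq_false_iff.mpr (fun he => hc j he))
    simp [this] at h
  · rintro ⟨j, hj⟩
    simp only [bne_iff_ne, ne_eq]
    rintro rfl
    simp [Nat.zero_testBit] at hj

-- the two loop bodies agree on strings
theorem pvMain (d1 d2 : String) :
    pvLoopA d1 d2 pvGroupsA =
      ((pvLoopB d1 d2 pvKwBits 0 0).1 &&& (pvLoopB d1 d2 pvKwBits 0 0).2 != 0) := by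
  rw [Bool.eq_iff_iff, pvLoopA_iff, pvLoopB_eq, pvNat_ne_zero_iff]
  have hg : pvGroupsBVals = pvGroupsA.map Prod.snd := rfl
  constructor
  · rintro ⟨t, g, hgt, h1, h2⟩
    refine ⟨t, ?_⟩
    rw [Nat.testBit_and, pvMask_testBit, pvMask_testBit]
    have hv : pvGroupsBVals[t]? = some g.2 := by
      rw [hg, List.getElem?_map, hgt]; rfl
    have e1 := (pvFlatten_any d1 pvGroupsBVals 0 t).mpr ⟨t, g.2, hv, by omega, h1⟩
    have e2 := (pvFlatten_any d2 pvGroupsBVals 0 t).mpr ⟨t, g.2, hv, by omega, h2⟩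
    simp only [pvKwBits, Nat.zero_testBit, Bool.false_or]
    rw [e1, e2]
    rfl
  · rintro ⟨j, hj⟩
    rw [Nat.testBit_and, pvMask_testBit, pvMask_testBit] at hj
    simp only [Nat.zero_testBit, Bool.false_or, Bool.and_eq_true, pvKwBits] at hj
    obtain ⟨e1, e2⟩ := hj
    obtain ⟨t1, k1, h1t, hj1, h1⟩ := (pvFlatten_any d1 pvGroupsBVals 0 j).mp e1
    obtain ⟨t2, k2, h2t, hj2, h2⟩ := (pvFlatten_any d2 pvGroupsBVals 0 j).mp e2
    have hteq : t1 = t2 := by omega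
    subst hteq
    rw [h1t] at h2t
    cases h2t
    rw [hg, List.getElem?_map] at h1t
    obtain ⟨g, hgt, hg2⟩ := Option.map_eq_some_iff.mp h1t
    subst hg2
    exact ⟨t1, g, hgt, h1, h2⟩

-- ===== VERDICT (by name: the statement is the Claim_ definition above) =====
theorem conviction_keywords_match_py_spec : Claim_equal_conviction_keywords_match_py := by
  intro desc1 desc2 _
  unfold Spec_conviction_keywords_match_py conviction_keywords_match_py conviction_keywords_match_py_alt
  cases desc1 with
  | none => rfl
  | some s1 =>
    cases desc2 with
    | none => rfl
    | some s2 =>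
      by_cases h : s1 = "" || s2 = ""
      · simp [h]
      · simp only [h, Bool.false_eq_true, if_false]
        exact pvMain (PySem.Str.lower s1) (PySem.Str.lower s2)
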